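-- pv_equiv track=rewrite | github.com/PaolaG365/PythonCourses | PythonFundamentalsMay2023/Text_processing/Exercise/10.Winning_ticket.py | winning_ticket
-- ===== SOURCE A (Python) =====
-- def winning_ticket(ticket_to_check):
--     if len(ticket_to_check) != 20:
--         return "invalid ticket"
--     winning_symbols = ["@", '#', '$', '^']
--     first_side = ticket_to_check[:10]
--     second_side = ticket_to_check[10:]
--     for symbol in winning_symbols:
--         for count in range(10, 5, -1):
--             symbols_to_match = symbol * count
--             if symbols_to_match in first_side and symbols_to_match in second_side:
--                 if count == 10:
--                     return f'ticket "{ticket_to_check}" - {count}{symbol} Jackpot!'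
--                 return f'ticket "{ticket_to_check}" - {count}{symbol}'
--     return f'ticket "{ticket_to_check}" - no match'
-- ===== SOURCE B (Python) =====
-- def _max_run(side, symbol):
--     best = cur = 0
--     for ch in side:
--         cur = cur + 1 if ch == symbol else 0
--         if cur > best:
--             best = cur
--     return best
--
--
-- def winning_ticket(ticket_to_check):
--     if len(ticket_to_check) != 20:
--         return "invalid ticket"
--     first_side = ticket_to_check[:10]
--     second_side = ticket_to_check[10:]
--     for symbol in ["@", '#', '$', '^']:
--         best = min(_max_run(first_side, symbol), _max_run(second_side, symbol))
--         if best >= 6: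
--             if best == 10:
--                 return f'ticket "{ticket_to_check}" - {best}{symbol} Jackpot!'
--             return f'ticket "{ticket_to_check}" - {best}{symbol}'
--     return f'ticket "{ticket_to_check}" - no match'
-- ===== Notes on version B (the rewrite author's own statement) =====
-- stated objective: alternative
-- what changed: Replaces A's nested loop of descending substring searches (building 'symbol*count' and scanning both halves for it) by a single left-to-right run-length scan per half and symbol, returning the formatted result when min(run_first, run_second) >= 6.
import Mathlib
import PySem

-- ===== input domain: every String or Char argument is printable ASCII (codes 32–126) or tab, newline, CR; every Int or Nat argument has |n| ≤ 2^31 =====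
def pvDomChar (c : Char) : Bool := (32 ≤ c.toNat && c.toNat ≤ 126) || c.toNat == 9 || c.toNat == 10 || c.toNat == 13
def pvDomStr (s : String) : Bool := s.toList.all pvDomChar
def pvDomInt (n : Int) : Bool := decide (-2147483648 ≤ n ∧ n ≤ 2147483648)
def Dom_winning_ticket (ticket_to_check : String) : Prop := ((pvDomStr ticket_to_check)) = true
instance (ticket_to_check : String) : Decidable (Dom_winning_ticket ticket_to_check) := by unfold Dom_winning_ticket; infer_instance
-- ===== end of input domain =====

-- B replaces A's nested descending substring-search loop by a single left-to-right
-- run-length scan of each half per symbol (objective: alternative decomposition, same observable result).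

-- ===== PORT A =====
-- inner 'for count in range(10, 5, -1)' loop of A (early return = Option)
def wtCountLoop (ticket : String) (symbol : Char) (first second : List Char) : List Int → Option String
  | [] => none
  | count :: rest =>
    let symbols_to_match := PySem.List.pyRepeat [symbol] count
    if PySem.Chars.isIn symbols_to_match first && PySem.Chars.isIn symbols_to_match second then
      if count == 10 then
        some (String.ofList ("ticket \"".toList ++ ticket.toList ++ "\" - ".toList ++
          PySem.Int.toChars count ++ [symbol] ++ " Jackpot!".toList))
      else
        some (String.ofList ("ticket \"".toList ++ ticket.toList ++ "\" - ".toList ++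
          PySem.Int.toChars count ++ [symbol]))
    else wtCountLoop ticket symbol first second rest

-- outer 'for symbol in winning_symbols' loop of A
def wtSymbolLoop (ticket : String) (first second : List Char) : List Char → Option String
  | [] => none
  | symbol :: rest =>
    match wtCountLoop ticket symbol first second (PySem.List.pyRange 10 5 (-1)) with
    | some r => some r
    | none => wtSymbolLoop ticket first second rest

def winning_ticket (ticket_to_check : String) : String :=
  if PySem.Str.len ticket_to_check ≠ 20 then "invalid ticket" else
  let first_side := PySem.List.slice ticket_to_check.toList none (some 10)
  let second_side := PySem.List.slice ticket_to_check.toList (some 10) none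
  match wtSymbolLoop ticket_to_check first_side second_side ['@', '#', '$', '^'] with
  | some r => r
  | none => String.ofList ("ticket \"".toList ++ ticket_to_check.toList ++ "\" - no match".toList)

-- ===== PORT B =====
-- Source B's _max_run: one scan keeping (best, cur)
def maxRunAlt (side : List Char) (symbol : Char) : Nat :=
  (side.foldl (fun (p : Nat × Nat) ch =>
      let cur := if ch == symbol then p.2 + 1 else 0
      (if cur > p.1 then cur else p.1, cur)) (0, 0)).1

-- Source B's 'for symbol in …' loop (early return = Option)
def wtAltLoop (ticket : String) (first second : List Char) : List Char → Option String
  | [] => none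
  | symbol :: rest =>
    let best := min (maxRunAlt first symbol) (maxRunAlt second symbol)
    if 6 ≤ best then
      if best == 10 then
        some (String.ofList ("ticket \"".toList ++ ticket.toList ++ "\" - ".toList ++
          PySem.Int.toChars (best : Int) ++ [symbol] ++ " Jackpot!".toList))
      else
        some (String.ofList ("ticket \"".toList ++ ticket.toList ++ "\" - ".toList ++
          PySem.Int.toChars (best : Int) ++ [symbol]))
    else wtAltLoop ticket first second rest

def winning_ticket_alt (ticket_to_check : String) : String :=
  if PySem.Str.len ticket_to_check ≠ 20 then "invalid ticket" else
  let first_side := ticket_to_check.toList.take 10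
  let second_side := ticket_to_check.toList.drop 10
  match wtAltLoop ticket_to_check first_side second_side ['@', '#', '$', '^'] with
  | some r => r
  | none => String.ofList ("ticket \"".toList ++ ticket_to_check.toList ++ "\" - no match".toList)

-- ===== PRECONDITION & SPEC =====
def Spec_winning_ticket (ticket_to_check : String) (out : String) : Prop := out = winning_ticket_alt ticket_to_check
instance (ticket_to_check : String) (out : String) : Decidable (Spec_winning_ticket ticket_to_check out) := by unfold Spec_winning_ticket; infer_instance

-- ===== CLAIM (what is proved, stated in full; the proofs are below) =====
def Claim_equal_winning_ticket : Prop := ∀ (ticket_to_check : String), Dom_winning_ticket ticket_to_check → Spec_winning_ticket ticket_to_check (winning_ticket ticket_to_check)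

-- ===== LEMMAS AND PROOFS =====

-- length of the leading run of c, and the max run length over the whole list
def leadRun (c : Char) : List Char → Nat
  | [] => 0
  | x :: t => if x == c then leadRun c t + 1 else 0

def mrec (c : Char) : List Char → Nat
  | [] => 0
  | x :: t => max (leadRun c (x :: t)) (mrec c t)

lemma leadRun_le_mrec (c : Char) (l : List Char) : leadRun c l ≤ mrec c l := by
  cases l with
  | nil => simp [leadRun, mrec]
  | cons x t => simp [mrec]

lemma leadRun_le_length (c : Char) (l : List Char) : leadRun c l ≤ l.length := by
  induction l with
  | nil => simp [leadRun]
  | cons x t ih => simp only [leadRun, List.length_cons]; split <;> omega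

lemma mrec_le_length (c : Char) (l : List Char) : mrec c l ≤ l.length := by
  induction l with
  | nil => simp [mrec]
  | cons x t ih =>
    have := leadRun_le_length c (x :: t)
    simp only [mrec, List.length_cons] at *
    omega

lemma foldl_run (c : Char) (l : List Char) : ∀ best cur : Nat,
    (l.foldl (fun (p : Nat × Nat) ch =>
        let cur := if ch == c then p.2 + 1 else 0
        (if cur > p.1 then cur else p.1, cur)) (best, cur)).1
      = max best (max (mrec c l) (if 0 < leadRun c l then cur + leadRun c l else 0)) := by
  induction l with
  | nil => intro best cur; simp [mrec, leadRun]
  | cons x t ih =>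
    intro best cur
    by_cases h : x == c
    · have hlr := leadRun_le_mrec c t
      simp only [List.foldl_cons, h, if_true, mrec, leadRun, ih]
      split_ifs <;> omega
    · have hlr := leadRun_le_mrec c t
      simp only [List.foldl_cons, h, mrec, leadRun, ih]
      split_ifs <;> omega

lemma maxRunAlt_eq_mrec (l : List Char) (c : Char) : maxRunAlt l c = mrec c l := by
  have h := foldl_run c l 0 0
  have hlr := leadRun_le_mrec c l
  unfold maxRunAlt
  rw [h]
  split_ifs <;> omega

lemma replicate_prefix_iff (c : Char) (l : List Char) : ∀ n : Nat,
    (List.replicate n c <+: l ↔ n ≤ leadRun c l) := by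
  induction l with
  | nil =>
    intro n
    constructor
    · intro h
      have := List.eq_nil_of_prefix_nil h
      simp [List.replicate_eq_nil_iff] at this
      simp [this, leadRun]
    · intro h
      simp only [leadRun] at h
      obtain rfl := Nat.le_zero.mp h
      simp
  | cons x t ih =>
    intro n
    cases n with
    | zero => simp
    | succ m =>
      rw [List.replicate_succ]
      constructor
      · intro h
        rw [List.cons_prefix_cons] at h
        obtain ⟨rfl, h2⟩ := h
        simp only [leadRun, beq_self_eq_true, if_true]
        have := (ih m).mp h2
        omega
      · intro h
        simp only [leadRun] at h
        by_cases hx : x == c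
        · simp only [hx, if_true] at h
          rw [List.cons_prefix_cons]
          exact ⟨(beq_iff_eq.mp hx).symm, (ih m).mpr (by omega)⟩
        · simp [hx] at h
    
lemma replicate_infix_iff (c : Char) (l : List Char) (n : Nat) :
    (List.replicate n c <:+: l ↔ n ≤ mrec c l) := by
  induction l with
  | nil =>
    constructor
    · intro h
      have := List.eq_nil_of_infix_nil h
      simp [List.replicate_eq_nil_iff] at this
      simp [this, mrec]
    · intro h
      simp [mrec] at h
      simp [h]
  | cons x t ih =>
    rw [List.infix_cons_iff, ih, replicate_prefix_iff]
    simp only [mrec]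
    omega

lemma isIn_repl (n : Nat) (c : Char) (l : List Char) :
    PySem.Chars.isIn (List.replicate n c) l = decide (n ≤ mrec c l) := by
  by_cases h : n ≤ mrec c l
  · simp only [h, decide_true]
    exact (PySem.Chars.isIn_iff_infix _ _).mpr ((replicate_infix_iff c l n).mpr h)
  · simp only [h, decide_false]
    rw [PySem.Chars.isIn_eq_false_iff]
    rw [replicate_infix_iff]
    exact h

lemma cond_eq (n : Nat) (c : Char) (first second : List Char) :
    (PySem.Chars.isIn (List.replicate n c) first && PySem.Chars.isIn (List.replicate n c) second)
      = decide (n ≤ min (mrec c first) (mrec c second)) := by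
  rw [isIn_repl, isIn_repl, ← Bool.decide_and]
  simp

lemma per_symbol (ticket : String) (s : Char) (first second : List Char)
    (h1 : first.length = 10) :
    wtCountLoop ticket s first second (PySem.List.pyRange 10 5 (-1))
      = (let best := min (mrec s first) (mrec s second)
         if 6 ≤ best then
           if best == 10 then
             some (String.ofList ("ticket \"".toList ++ ticket.toList ++ "\" - ".toList ++
               PySem.Int.toChars (best : Int) ++ [s] ++ " Jackpot!".toList))
           else
             some (String.ofList ("ticket \"".toList ++ ticket.toList ++ "\" - ".toList ++
               PySem.Int.toChars (best : Int) ++ [s]))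
         else none) := by
  have hr : PySem.List.pyRange 10 5 (-1) = [10, 9, 8, 7, 6] := by decide
  have hb : min (mrec s first) (mrec s second) ≤ 10 := by
    have := mrec_le_length s first
    omega
  rw [hr]
  simp only [wtCountLoop, PySem.List.pyRepeat_singleton]
  rw [show List.replicate (Int.toNat 10) s = List.replicate 10 s from rfl,
      show List.replicate (Int.toNat 9) s = List.replicate 9 s from rfl,
      show List.replicate (Int.toNat 8) s = List.replicate 8 s from rfl,
      show List.replicate (Int.toNat 7) s = List.replicate 7 s from rfl,
      show List.replicate (Int.toNat 6) s = List.replicate 6 s from rfl]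
  rw [cond_eq, cond_eq, cond_eq, cond_eq, cond_eq]
  set b := min (mrec s first) (mrec s second) with hbdef
  clear hbdef
  interval_cases b <;> simp

lemma loops_eq (ticket : String) (first second : List Char)
    (h1 : first.length = 10) (syms : List Char) :
    wtSymbolLoop ticket first second syms = wtAltLoop ticket first second syms := by
  induction syms with
  | nil => rfl
  | cons s rest ih =>
    simp only [wtSymbolLoop, wtAltLoop, per_symbol ticket s first second h1,
      maxRunAlt_eq_mrec, ih]
    split_ifs <;> rfl

-- ===== VERDICT (by name: the statement is the Claim_ definition above) =====
theorem winning_ticket_spec : Claim_equal_winning_ticket := by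
  intro t _
  unfold Spec_winning_ticket winning_ticket winning_ticket_alt
  have hlen : PySem.Str.len t = (t.toList.length : Int) := by simp
  rw [hlen]
  by_cases h : (t.toList.length : Int) ≠ 20
  · rw [if_pos h, if_pos h]
  · rw [if_neg h, if_neg h]
    have hlen20 : t.toList.length = 20 := by omega
    have hs1 : PySem.List.slice t.toList none (some 10) = t.toList.take 10 := by
      have := PySem.List.slice_to_natCast t.toList 10; simpa using this
    have hs2 : PySem.List.slice t.toList (some 10) none = t.toList.drop 10 := by
      have := PySem.List.slice_from_natCast t.toList 10; simpa using this
    rw [hs1, hs2]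
    have hl := loops_eq t (List.take 10 t.toList) (List.drop 10 t.toList)
      (by simp [hlen20]) ['@', '#', '$', '^']
    simp only [hl]
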